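-- pv_equiv track=rewrite | github.com/zdeitch/AdventofCode | Day6.py | split_numbers
-- ===== SOURCE A (Python) =====
-- def split_numbers(columns):
--     groups = []
--     current = []
--     for col in columns:
--         if all(ch == ' ' for ch in col[:-1]):
--             if current:
--                 groups.append(current)
--                 current = []
--         else:
--             current.append(col)
--     if current:
--         groups.append(current)
--     return groups
-- ===== SOURCE B (Python) =====
-- def split_numbers(columns):
--     def is_sep(col):
--         return all(ch == ' ' for ch in col[:-1])
--     n = len(columns)
--     groups = []
--     i = 0
--     while i < n:
--         if is_sep(columns[i]):
--             i += 1
--         else: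
--             j = i
--             while j < n and not is_sep(columns[j]):
--                 j += 1
--             groups.append(columns[i:j])
--             i = j
--     return groups
-- ===== Notes on version B (the rewrite author's own statement) =====
-- stated objective: alternative
-- what changed: Replaced the accumulator fold (groups/current state with a flush at the end) with a stateless index scan that skips separator columns and emits each maximal run of non-separator columns as a single slice.
import Mathlib
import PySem

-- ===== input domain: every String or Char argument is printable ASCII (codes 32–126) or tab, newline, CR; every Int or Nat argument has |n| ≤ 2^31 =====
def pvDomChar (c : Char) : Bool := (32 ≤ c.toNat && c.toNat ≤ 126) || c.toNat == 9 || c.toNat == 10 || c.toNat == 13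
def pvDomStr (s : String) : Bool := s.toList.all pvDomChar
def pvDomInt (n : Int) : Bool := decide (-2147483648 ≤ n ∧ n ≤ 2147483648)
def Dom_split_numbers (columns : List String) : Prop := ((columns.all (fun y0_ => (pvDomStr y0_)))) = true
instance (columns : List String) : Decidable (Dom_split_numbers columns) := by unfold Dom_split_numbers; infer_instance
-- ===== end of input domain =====

-- B replaces A's accumulator fold with a stateless scan emitting each maximal
-- run of non-separator columns as one slice (alternative decomposition, same cost).


-- ===== PORT A =====
-- shared helper: Python's `all(ch == ' ' for ch in col[:-1])` (col[:-1] = dropLast, exact)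
def pvIsSep (col : String) : Bool := col.toList.dropLast.all (· == ' ')

def split_numbers (columns : List String) : List (List String) :=
  let st := columns.foldl
    (fun (st : List (List String) × List String) col =>
      if pvIsSep col then
        if st.2 ≠ [] then (st.1 ++ [st.2], []) else st
      else (st.1, st.2 ++ [col]))
    ([], [])
  if st.2 ≠ [] then st.1 ++ [st.2] else st.1

-- ===== PORT B =====
-- B scans the list: separator columns are skipped; at a non-separator column the
-- inner while-loop advance `j` / slice columns[i:j] is the span (takeWhile/dropWhile)
-- of the remaining suffix; recursion on the suffix mirrors `i = j`.
def split_numbers_alt : List String → List (List String)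
  | [] => []
  | c :: rest =>
    if pvIsSep c then split_numbers_alt rest
    else
      ((c :: rest).takeWhile (fun x => !pvIsSep x))
        :: split_numbers_alt ((c :: rest).dropWhile (fun x => !pvIsSep x))
termination_by cols => cols.length
decreasing_by
  all_goals simp_all [List.dropWhile]
  exact List.length_dropWhile_le _ _

-- ===== PRECONDITION & SPEC =====
def Spec_split_numbers (columns : List String) (out : List (List String)) : Prop := out = split_numbers_alt columns
instance (columns : List String) (out : List (List String)) : Decidable (Spec_split_numbers columns out) := by unfold Spec_split_numbers; infer_instance

-- ===== CLAIM (what is proved, stated in full; the proofs are below) =====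
def Claim_equal_split_numbers : Prop := ∀ (columns : List String), Dom_split_numbers columns → Spec_split_numbers columns (split_numbers columns)

-- ===== LEMMAS AND PROOFS =====

def pvStep (st : List (List String) × List String) (col : String) :
    List (List String) × List String :=
  if pvIsSep col then
    if st.2 ≠ [] then (st.1 ++ [st.2], []) else st
  else (st.1, st.2 ++ [col])

def pvFinish (st : List (List String) × List String) : List (List String) :=
  if st.2 ≠ [] then st.1 ++ [st.2] else st.1

theorem alt_sep {c : String} {rest : List String} (h : pvIsSep c = true) :
    split_numbers_alt (c :: rest) = split_numbers_alt rest := by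
  rw [split_numbers_alt.eq_def]; simp [h]

theorem alt_nonsep {c : String} {rest : List String} (h : pvIsSep c = false) :
    split_numbers_alt (c :: rest) =
      (c :: rest.takeWhile (fun x => !pvIsSep x))
        :: split_numbers_alt (rest.dropWhile (fun x => !pvIsSep x)) := by
  rw [split_numbers_alt.eq_def]; simp [h]

-- what B computes when A's loop starts with pending run `current`
def pvRest (current : List String) (cols : List String) : List (List String) :=
  if current = [] then split_numbers_alt cols
  else (current ++ cols.takeWhile (fun x => !pvIsSep x))
        :: split_numbers_alt (cols.dropWhile (fun x => !pvIsSep x))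

theorem loop_inv (cols : List String) :
    ∀ (groups : List (List String)) (current : List String),
      pvFinish (cols.foldl pvStep (groups, current)) = groups ++ pvRest current cols := by
  induction cols with
  | nil =>
    intro groups current
    have h0 : split_numbers_alt [] = [] := by rw [split_numbers_alt.eq_def]
    by_cases h : current = [] <;>
      simp [pvFinish, pvRest, h, h0]
  | cons c cs ih =>
    intro groups current
    by_cases hs : pvIsSep c = true
    · by_cases h : current = []
      · simp [List.foldl_cons, pvStep, hs, h, ih, pvRest, alt_sep hs]
      · simp only [List.foldl_cons, pvStep, hs, if_pos, h, ne_eq, not_false_iff, ih]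
        simp [pvRest, h, alt_sep hs, hs]
    · have hs' : pvIsSep c = false := by simpa using hs
      simp only [List.foldl_cons, pvStep, hs', Bool.false_eq_true, if_false, ih]
      by_cases h : current = []
      · simp [pvRest, h, alt_nonsep hs']
      · simp [pvRest, h, hs']

-- ===== VERDICT (by name: the statement is the Claim_ definition above) =====
theorem split_numbers_spec : Claim_equal_split_numbers := by
  intro columns _
  unfold Spec_split_numbers split_numbers
  have hstep : (fun (st : List (List String) × List String) col =>
      if pvIsSep col then if st.2 ≠ [] then (st.1 ++ [st.2], []) else st
      else (st.1, st.2 ++ [col])) = pvStep := by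
    funext st col; rfl
  rw [hstep]
  have := loop_inv columns [] []
  simpa [pvFinish, pvRest] using this
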